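-- pv_equiv track=rewrite | github.com/pghanem/Data-Structures-Algorithms | 1_5_oneAway.py | oneInsert
-- ===== SOURCE A (Python) =====
-- def oneInsert(s1, s2):
--     index1 = 0
--     index2 = 0
--     while(index2 < len(s2) and index1 < len(s1)):
--         if s1[index1] != s2[index2]:
--             if index1 != index2:
--                 return False
--             index2 += 1
--         else:
--             index1 += 1
--             index2 += 1
--     return True
-- ===== SOURCE B (Python) =====
-- def oneInsert(s1, s2):
--     n1, n2 = len(s1), len(s2)
--     i = 0
--     while i < n1 and i < n2 and s1[i] == s2[i]:
--         i += 1
--     if i == min(n1, n2):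
--         return True
--     k = min(n1 - i, n2 - i - 1)
--     return s1[i:i+k] == s2[i+1:i+1+k]
-- ===== Notes on version B (the rewrite author's own statement) =====
-- stated objective: alternative
-- what changed: Replaces A's single two-pointer loop with skip-state logic by a find-first-divergence loop followed by one slice-equality comparison of the remainders.
import Mathlib
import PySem

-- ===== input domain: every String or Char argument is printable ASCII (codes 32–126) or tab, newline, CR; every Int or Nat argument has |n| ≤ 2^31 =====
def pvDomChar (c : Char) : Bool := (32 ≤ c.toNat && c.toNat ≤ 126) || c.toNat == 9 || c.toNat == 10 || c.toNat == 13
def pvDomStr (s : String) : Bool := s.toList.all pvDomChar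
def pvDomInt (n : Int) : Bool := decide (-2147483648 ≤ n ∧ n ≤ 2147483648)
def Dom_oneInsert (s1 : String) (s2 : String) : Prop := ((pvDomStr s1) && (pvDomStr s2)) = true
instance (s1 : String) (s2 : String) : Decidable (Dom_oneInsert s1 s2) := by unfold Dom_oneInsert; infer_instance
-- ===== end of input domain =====

-- B replaces A's two-pointer skip loop by find-first-divergence + one slice comparison (objective: alternative decomposition).

-- ===== PORT A =====
-- A's while loop over the two indices; fuel = len(s2) bounds the iterations (index2 grows
-- every iteration), so the guarded loop never exhausts it.
def oneInsertLoop (l1 l2 : List Char) (i1 i2 : Nat) : Nat → Bool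
  | 0 => true
  | fuel + 1 =>
    if i2 < l2.length ∧ i1 < l1.length then
      if l1.getD i1 ' ' ≠ l2.getD i2 ' ' then
        if i1 ≠ i2 then false
        else oneInsertLoop l1 l2 i1 (i2 + 1) fuel
      else oneInsertLoop l1 l2 (i1 + 1) (i2 + 1) fuel
    else true

def oneInsert (s1 : String) (s2 : String) : Bool :=
  oneInsertLoop s1.toList s2.toList 0 0 s2.toList.length

-- ===== PORT B =====
-- B's while loop advancing i past the common prefix; fuel = len(s1) bounds the iterations.
def oneInsertAltLoop (l1 l2 : List Char) (i : Nat) : Nat → Nat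
  | 0 => i
  | fuel + 1 =>
    if i < l1.length ∧ i < l2.length ∧ l1.getD i ' ' = l2.getD i ' ' then
      oneInsertAltLoop l1 l2 (i + 1) fuel
    else i

-- transliteration of Source B; Python slices s1[i:i+k], s2[i+1:i+1+k] via PySem.List.slice (exact: indices nonnegative)
def oneInsert_alt (s1 : String) (s2 : String) : Bool :=
  let l1 := s1.toList
  let l2 := s2.toList
  let n1 := l1.length
  let n2 := l2.length
  let i := oneInsertAltLoop l1 l2 0 n1
  if i = min n1 n2 then true
  else
    let k := min (n1 - i) (n2 - i - 1)
    PySem.List.slice l1 (some (i : Int)) (some ((i : Int) + (k : Int))) =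
      PySem.List.slice l2 (some ((i : Int) + 1)) (some ((i : Int) + 1 + (k : Int)))

-- ===== PRECONDITION & SPEC =====

def Spec_oneInsert (s1 : String) (s2 : String) (out : Bool) : Prop := out = oneInsert_alt s1 s2
instance (s1 : String) (s2 : String) (out : Bool) : Decidable (Spec_oneInsert s1 s2 out) := by unfold Spec_oneInsert; infer_instance

-- ===== CLAIM (what is proved, stated in full; the proofs are below) =====
def Claim_equal_oneInsert : Prop := ∀ (s1 : String) (s2 : String), Dom_oneInsert s1 s2 → Spec_oneInsert s1 s2 (oneInsert s1 s2)

-- ===== LEMMAS AND PROOFS =====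

-- proof-side structural versions of the two phases of A's loop
def phase1 : List Char → List Char → Bool
  | a :: t1, b :: t2 => if a ≠ b then false else phase1 t1 t2
  | _, _ => true

def phase0 : List Char → List Char → Bool
  | a :: t1, b :: t2 => if a ≠ b then phase1 (a :: t1) t2 else phase0 t1 t2
  | _, _ => true

def firstDiff : List Char → List Char → Nat
  | a :: t1, b :: t2 => if a = b then firstDiff t1 t2 + 1 else 0
  | _, _ => 0


-- degenerate cases
theorem phase1_nil (x y : List Char) (h : x = [] ∨ y = []) : phase1 x y = true := by
  cases x <;> cases y <;> simp_all [phase1]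

theorem phase0_nil (x y : List Char) (h : x = [] ∨ y = []) : phase0 x y = true := by
  cases x <;> cases y <;> simp_all [phase0]

theorem firstDiff_nil (x y : List Char) (h : x = [] ∨ y = []) : firstDiff x y = 0 := by
  cases x <;> cases y <;> simp_all [firstDiff]

-- A's loop in its two phases (i2 = i1 before the skip, i2 = i1 + 1 after)
theorem loop_phases (l1 l2 : List Char) (fuel : Nat) : ∀ (i1 i2 : Nat), l2.length - i2 ≤ fuel →
    (i2 = i1 + 1 → oneInsertLoop l1 l2 i1 i2 fuel = phase1 (l1.drop i1) (l2.drop i2)) ∧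
    (i2 = i1 → oneInsertLoop l1 l2 i1 i2 fuel = phase0 (l1.drop i1) (l2.drop i2)) := by
  induction fuel with
  | zero =>
    intro i1 i2 hf
    have hnil : l2.drop i2 = [] := List.drop_eq_nil_of_le (by omega)
    exact ⟨fun _ => (phase1_nil _ _ (Or.inr hnil)).symm,
           fun _ => (phase0_nil _ _ (Or.inr hnil)).symm⟩
  | succ fuel ih =>
    intro i1 i2 hf
    by_cases hg : i2 < l2.length ∧ i1 < l1.length
    · obtain ⟨h2, h1⟩ := hg
      rw [show oneInsertLoop l1 l2 i1 i2 (fuel + 1) =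
          (if i2 < l2.length ∧ i1 < l1.length then
            (if l1.getD i1 ' ' ≠ l2.getD i2 ' ' then
              (if i1 ≠ i2 then false else oneInsertLoop l1 l2 i1 (i2 + 1) fuel)
             else oneInsertLoop l1 l2 (i1 + 1) (i2 + 1) fuel)
           else true) from rfl]
      rw [if_pos ⟨h2, h1⟩]
      have hget : (l1.getD i1 ' ' = l2.getD i2 ' ') ↔ l1[i1] = l2[i2] := by
        simp [List.getD_eq_getElem?_getD, List.getElem?_eq_getElem h1,
          List.getElem?_eq_getElem h2]
      rw [List.drop_eq_getElem_cons h1, List.drop_eq_getElem_cons h2]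
      by_cases hne : l1.getD i1 ' ' = l2.getD i2 ' '
      · -- characters match: advance both
        rw [if_neg (by simpa using hne)]
        have heq : l1[i1] = l2[i2] := hget.mp hne
        refine ⟨fun he => ?_, fun he => ?_⟩
        · rw [(ih (i1 + 1) (i2 + 1) (by omega)).1 (by omega), phase1, if_neg (by simp [heq])]
        · rw [(ih (i1 + 1) (i2 + 1) (by omega)).2 (by omega), phase0, if_neg (by simp [heq])]
      · -- mismatch
        rw [if_pos (by simpa using hne)]
        have hne' : ¬ l1[i1] = l2[i2] := fun he => hne (hget.mpr he)
        refine ⟨fun he => ?_, fun he => ?_⟩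
        · -- already skipped: return False, and phase1 heads differ
          rw [if_pos (by omega : i1 ≠ i2), phase1, if_pos (by simpa using hne')]
        · -- first mismatch: skip in s2
          rw [if_neg (by omega : ¬ i1 ≠ i2), phase0, if_pos (by simpa using hne')]
          rw [(ih i1 (i2 + 1) (by omega)).1 (by omega)]
          rw [← List.drop_eq_getElem_cons h1]
    · rw [show oneInsertLoop l1 l2 i1 i2 (fuel + 1) =
          (if i2 < l2.length ∧ i1 < l1.length then
            (if l1.getD i1 ' ' ≠ l2.getD i2 ' ' then
              (if i1 ≠ i2 then false else oneInsertLoop l1 l2 i1 (i2 + 1) fuel)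
             else oneInsertLoop l1 l2 (i1 + 1) (i2 + 1) fuel)
           else true) from rfl]
      rw [if_neg hg]
      have hd : l1.drop i1 = [] ∨ l2.drop i2 = [] := by
        rcases not_and_or.mp hg with h' | h'
        · right; exact List.drop_eq_nil_of_le (by omega)
        · left; exact List.drop_eq_nil_of_le (by omega)
      exact ⟨fun _ => (phase1_nil _ _ hd).symm, fun _ => (phase0_nil _ _ hd).symm⟩

-- B's prefix loop computes firstDiff of the suffixes
theorem altLoop_eq (l1 l2 : List Char) (fuel : Nat) : ∀ (i : Nat), l1.length - i ≤ fuel →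
    oneInsertAltLoop l1 l2 i fuel = i + firstDiff (l1.drop i) (l2.drop i) := by
  induction fuel with
  | zero =>
    intro i hf
    have hnil : l1.drop i = [] := List.drop_eq_nil_of_le (by omega)
    rw [hnil, firstDiff_nil _ _ (Or.inl rfl)]
    rfl
  | succ fuel ih =>
    intro i hf
    rw [show oneInsertAltLoop l1 l2 i (fuel + 1) =
        (if i < l1.length ∧ i < l2.length ∧ l1.getD i ' ' = l2.getD i ' ' then
          oneInsertAltLoop l1 l2 (i + 1) fuel
         else i) from rfl]
    by_cases hg : i < l1.length ∧ i < l2.length ∧ l1.getD i ' ' = l2.getD i ' '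
    · obtain ⟨h1, h2, heq⟩ := hg
      rw [if_pos ⟨h1, h2, heq⟩, ih (i + 1) (by omega)]
      rw [List.drop_eq_getElem_cons h1, List.drop_eq_getElem_cons h2, firstDiff]
      have : l1[i] = l2[i] := by
        simpa [List.getD_eq_getElem?_getD, List.getElem?_eq_getElem h1,
          List.getElem?_eq_getElem h2] using heq
      rw [if_pos this]
      omega
    · rw [if_neg hg]
      by_cases h1 : i < l1.length
      · by_cases h2 : i < l2.length
        · have hne : l1.getD i ' ' ≠ l2.getD i ' ' := fun he => hg ⟨h1, h2, he⟩
          have hgne : ¬ l1[i] = l2[i] := by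
            simpa [List.getD_eq_getElem?_getD, List.getElem?_eq_getElem h1,
              List.getElem?_eq_getElem h2] using hne
          rw [List.drop_eq_getElem_cons h1, List.drop_eq_getElem_cons h2, firstDiff,
            if_neg hgne]
          omega
        · rw [firstDiff_nil _ _ (Or.inr (List.drop_eq_nil_of_le (by omega)))]
          omega
      · rw [firstDiff_nil _ _ (Or.inl (List.drop_eq_nil_of_le (by omega)))]
        omega
-- phase1 is prefix comparison up to the shorter length
theorem phase1_take (x y : List Char) :
    phase1 x y = decide (x.take (min x.length y.length) = y.take (min x.length y.length)) := by
  induction x generalizing y with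
  | nil => cases y <;> simp [phase1]
  | cons a t1 ih =>
    cases y with
    | nil => simp [phase1]
    | cons b t2 =>
      rw [phase1]
      have hmin : min (t1.length + 1) (t2.length + 1) = min t1.length t2.length + 1 := by omega
      simp only [List.length_cons, hmin, List.take_succ_cons, List.cons.injEq]
      by_cases hab : a = b
      · simp [hab, ih]
      · simp [hab]

-- phase0 equals B's find-then-compare value
theorem phase0_alt (l1 l2 : List Char) :
    phase0 l1 l2 =
      (if firstDiff l1 l2 = min l1.length l2.length then true
       else decide
        ((l1.drop (firstDiff l1 l2)).take
            (min (l1.length - firstDiff l1 l2) (l2.length - firstDiff l1 l2 - 1)) =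
          (l2.drop (firstDiff l1 l2 + 1)).take
            (min (l1.length - firstDiff l1 l2) (l2.length - firstDiff l1 l2 - 1)))) := by
  induction l1 generalizing l2 with
  | nil => cases l2 <;> simp [phase0, firstDiff]
  | cons a t1 ih =>
    cases l2 with
    | nil => simp [phase0, firstDiff]
    | cons b t2 =>
      by_cases hab : a = b
      · subst hab
        rw [phase0, if_neg (by simp), firstDiff, if_pos rfl]
        rw [ih t2]
        simp only [List.length_cons, List.drop_succ_cons, Nat.succ_min_succ,
          Nat.add_sub_add_right]
        simp [Nat.succ_eq_add_one]
      · rw [phase0, if_pos (by simp [hab]), firstDiff, if_neg hab]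
        have hc : ¬ (0 = min (a :: t1).length (b :: t2).length) := by
          simp only [List.length_cons]; omega
        rw [if_neg hc]
        simp only [List.drop_zero, List.drop_succ_cons, List.length_cons,
          Nat.sub_zero, Nat.add_sub_cancel]
        exact phase1_take (a :: t1) t2

theorem oneInsert_spec : Claim_equal_oneInsert := by
  intro s1 s2 _
  unfold Spec_oneInsert oneInsert oneInsert_alt
  rw [(loop_phases s1.toList s2.toList s2.toList.length 0 0 (by omega)).2 rfl]
  simp only [List.drop_zero]
  rw [altLoop_eq s1.toList s2.toList s1.toList.length 0 (by omega)]
  simp only [List.drop_zero, Nat.zero_add]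
  rw [phase0_alt]
  set l1 := s1.toList
  set l2 := s2.toList
  set i := firstDiff l1 l2 with hi
  set k := min (l1.length - i) (l2.length - i - 1) with hk
  have hs1 : PySem.List.slice l1 (some (i : Int)) (some ((i : Int) + (k : Int))) =
      (l1.drop i).take k := PySem.List.slice_natCast_add l1 i k
  have hs2 : PySem.List.slice l2 (some ((i : Int) + 1)) (some ((i : Int) + 1 + (k : Int))) =
      (l2.drop (i + 1)).take k := by
    have : ((i : Int) + 1) = ((i + 1 : Nat) : Int) := by push_cast; ring
    rw [this]
    exact PySem.List.slice_natCast_add l2 (i + 1) k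
  rw [hs1, hs2]
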